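-- pv_equiv track=rewrite | github.com/tomcnv/qauntgambit | quantgambit-python/quantgambit/deeptrader_core/profiles/profile_router.py | _infer_regime_allowlist
-- ===== SOURCE A (Python) =====
-- from typing import List, Dict, Optional, Tuple, Any
--
-- _REGIME_TAG_MAP = {
--     "trend": {"trend", "momentum", "breakout", "volatility"},
--     "mean_revert": {"mean_reversion", "reversal", "fade", "contrarian", "vwap", "range"},
--     "avoid": {"chop", "avoid"},
-- }
--
-- def _infer_regime_allowlist(tags: List[str]) -> Optional[List[str]]:
--     if not tags:
--         return None
--     normalized = {str(tag).lower() for tag in tags}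
--     allow = set()
--     for regime, tagset in _REGIME_TAG_MAP.items():
--         if normalized & tagset:
--             allow.add(regime)
--     return sorted(allow) if allow else None
-- ===== SOURCE B (Python) =====
-- from typing import List, Optional
--
-- _REGIME_TAG_MAP = {
--     "trend": {"trend", "momentum", "breakout", "volatility"},
--     "mean_revert": {"mean_reversion", "reversal", "fade", "contrarian", "vwap", "range"},
--     "avoid": {"chop", "avoid"},
-- }
--
-- # Flat inverted lookup: each tag maps to its (unique) regime; tagsets are disjoint.
-- _TAG_TO_REGIME = {
--     tag: regime
--     for regime, tagset in _REGIME_TAG_MAP.items()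
--     for tag in sorted(tagset)
-- }
--
-- def _infer_regime_allowlist(tags: List[str]) -> Optional[List[str]]:
--     if not tags:
--         return None
--     allow = set()
--     for tag in tags:
--         regime = _TAG_TO_REGIME.get(str(tag).lower())
--         if regime is not None:
--             allow.add(regime)
--     return sorted(allow) if allow else None
-- ===== Notes on version B (the rewrite author's own statement) =====
-- stated objective: idiomatic
-- what changed: Replaced the per-regime loop with set intersections by a flat inverted tag->regime dict built once and a single pass over the input tags doing O(1) lookups.
import Mathlib
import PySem

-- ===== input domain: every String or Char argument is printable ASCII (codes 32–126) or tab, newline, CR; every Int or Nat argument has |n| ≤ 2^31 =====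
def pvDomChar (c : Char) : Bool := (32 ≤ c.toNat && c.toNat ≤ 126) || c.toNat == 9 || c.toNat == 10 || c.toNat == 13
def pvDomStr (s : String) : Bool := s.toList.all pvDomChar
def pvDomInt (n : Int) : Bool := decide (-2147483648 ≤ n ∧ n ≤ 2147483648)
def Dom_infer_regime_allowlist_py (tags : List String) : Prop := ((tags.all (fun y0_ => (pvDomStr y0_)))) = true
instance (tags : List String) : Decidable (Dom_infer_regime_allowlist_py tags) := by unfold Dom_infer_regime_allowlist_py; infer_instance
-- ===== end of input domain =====

-- B replaces the per-regime set-intersection loop by a flat inverted tag->regime dict and one pass over the tags (idiomatic; same result since the tagsets are disjoint).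


-- ===== PORT A =====
-- _REGIME_TAG_MAP: the tagset literals are duplicate-free, so each Python set literal is its element list as a PySem.Set.
def pvRegimeTagMap : List (String × PySem.Set String) :=
  [("trend", ["trend", "momentum", "breakout", "volatility"]),
   ("mean_revert", ["mean_reversion", "reversal", "fade", "contrarian", "vwap", "range"]),
   ("avoid", ["chop", "avoid"])]

def infer_regime_allowlist_py (tags : List String) : Option (List String) :=
  if tags = [] then none
  else
    let normalized : PySem.Set String := PySem.Set.ofList (tags.map PySem.Str.lower)
    let allow : PySem.Set String :=
      pvRegimeTagMap.foldl
        (fun allow p => if PySem.Set.inter normalized p.2 ≠ [] then PySem.Set.add allow p.1 else allow)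
        PySem.Set.empty
    if allow = [] then none
    else some (PySem.List.sorted allow (fun x => x) false)

-- ===== PORT B =====
-- _TAG_TO_REGIME: the comprehension inserts per regime, tags in sorted(tagset) order; all 12 keys are distinct, so the successive inserts give this literal association list.
def pvTagToRegime : PySem.Dict String String := PySem.Dict.ofList
  [("breakout", "trend"), ("momentum", "trend"), ("trend", "trend"), ("volatility", "trend"),
   ("contrarian", "mean_revert"), ("fade", "mean_revert"), ("mean_reversion", "mean_revert"),
   ("range", "mean_revert"), ("reversal", "mean_revert"), ("vwap", "mean_revert"),
   ("avoid", "avoid"), ("chop", "avoid")]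

def infer_regime_allowlist_py_alt (tags : List String) : Option (List String) :=
  if tags = [] then none
  else
    let allow : PySem.Set String :=
      tags.foldl
        (fun allow tag =>
          match pvTagToRegime.get? (PySem.Str.lower tag) with
          | some regime => PySem.Set.add allow regime
          | none => allow)
        PySem.Set.empty
    if allow = [] then none
    else some (PySem.List.sorted allow (fun x => x) false)

-- ===== PRECONDITION & SPEC =====
def Spec_infer_regime_allowlist_py (tags : List String) (out : Option (List String)) : Prop := out = infer_regime_allowlist_py_alt tags
instance (tags : List String) (out : Option (List String)) : Decidable (Spec_infer_regime_allowlist_py tags out) := by unfold Spec_infer_regime_allowlist_py; infer_instance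

-- ===== CLAIM (what is proved, stated in full; the proofs are below) =====
def Claim_equal_infer_regime_allowlist_py : Prop := ∀ (tags : List String), Dom_infer_regime_allowlist_py tags → Spec_infer_regime_allowlist_py tags (infer_regime_allowlist_py tags)

-- ===== LEMMAS AND PROOFS =====

-- the inverted dict looks a tag up to its regime: characterisation of get? on the literal dict
lemma pv_lookup (x : String) : pvTagToRegime.get? x =
    (if x ∈ (["trend", "momentum", "breakout", "volatility"] : List String) then some "trend"
     else if x ∈ (["mean_reversion", "reversal", "fade", "contrarian", "vwap", "range"] : List String) then some "mean_revert"
     else if x ∈ (["chop", "avoid"] : List String) then some "avoid"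
     else none) := by
  by_cases hx : x ∈ (["breakout", "momentum", "trend", "volatility", "contrarian", "fade",
      "mean_reversion", "range", "reversal", "vwap", "avoid", "chop"] : List String)
  · fin_cases hx <;> decide
  · simp only [List.mem_cons, List.not_mem_nil, or_false, not_or] at hx
    obtain ⟨h1, h2, h3, h4, h5, h6, h7, h8, h9, h10, h11, h12⟩ := hx
    have hitems : pvTagToRegime.items =
        [("breakout", "trend"), ("momentum", "trend"), ("trend", "trend"), ("volatility", "trend"),
         ("contrarian", "mean_revert"), ("fade", "mean_revert"), ("mean_reversion", "mean_revert"),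
         ("range", "mean_revert"), ("reversal", "mean_revert"), ("vwap", "mean_revert"),
         ("avoid", "avoid"), ("chop", "avoid")] := by decide
    have hg : pvTagToRegime.get? x = none := by
      simp [PySem.Dict.get?, hitems, List.find?_eq_none, beq_iff_eq]
      exact ⟨fun e => h1 e.symm, fun e => h2 e.symm, fun e => h3 e.symm, fun e => h4 e.symm,
        fun e => h5 e.symm, fun e => h6 e.symm, fun e => h7 e.symm, fun e => h8 e.symm,
        fun e => h9 e.symm, fun e => h10 e.symm, fun e => h11 e.symm, fun e => h12 e.symm⟩
    rw [hg]
    simp [h1, h2, h3, h4, h5, h6, h7, h8, h9, h10, h11, h12]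

lemma pv_get_some (x r : String) : pvTagToRegime.get? x = some r ↔
    (x ∈ (["trend", "momentum", "breakout", "volatility"] : List String) ∧ r = "trend") ∨
    (x ∈ (["mean_reversion", "reversal", "fade", "contrarian", "vwap", "range"] : List String) ∧ r = "mean_revert") ∨
    (x ∈ (["chop", "avoid"] : List String) ∧ r = "avoid") := by
  rw [pv_lookup]
  split_ifs with h1 h2 h3
  · have n2 : x ∉ (["mean_reversion", "reversal", "fade", "contrarian", "vwap", "range"] : List String) := by
      fin_cases h1 <;> decide
    have n3 : x ∉ (["chop", "avoid"] : List String) := by fin_cases h1 <;> decide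
    simp [h1, n2, n3, eq_comm]
  · have n3 : x ∉ (["chop", "avoid"] : List String) := by fin_cases h2 <;> decide
    simp [h1, h2, n3, eq_comm]
  · simp [h1, h2, h3, eq_comm]
  · simp [h1, h2, h3]

-- membership in B's accumulator loop
lemma pv_memB (tags : List String) (acc : PySem.Set String) (r : String) :
    r ∈ tags.foldl
        (fun allow tag =>
          match pvTagToRegime.get? (PySem.Str.lower tag) with
          | some regime => PySem.Set.add allow regime
          | none => allow) acc ↔
      r ∈ acc ∨ ∃ t ∈ tags, pvTagToRegime.get? (PySem.Str.lower t) = some r := by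
  induction tags generalizing acc with
  | nil => simp
  | cons t ts ih =>
    simp only [List.foldl_cons]
    cases hg : pvTagToRegime.get? (PySem.Str.lower t) with
    | none => rw [ih]; simp [hg]
    | some reg => rw [ih]; simp [hg, PySem.Set.mem_add]; tauto

lemma pv_nodupB (tags : List String) (acc : PySem.Set String) (h : acc.Nodup) :
    (tags.foldl
        (fun allow tag =>
          match pvTagToRegime.get? (PySem.Str.lower tag) with
          | some regime => PySem.Set.add allow regime
          | none => allow) acc).Nodup := by
  induction tags generalizing acc with
  | nil => exact h
  | cons t ts ih =>
    simp only [List.foldl_cons]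
    cases hg : pvTagToRegime.get? (PySem.Str.lower t) with
    | none => exact ih _ h
    | some reg => exact ih _ (PySem.Set.nodup_add _ _ h)


-- membership in A's accumulator loop over the three regimes
lemma pv_memA (N : PySem.Set String) (r : String) :
    r ∈ pvRegimeTagMap.foldl
        (fun allow p => if PySem.Set.inter N p.2 ≠ [] then PySem.Set.add allow p.1 else allow)
        PySem.Set.empty ↔
      (PySem.Set.inter N ["trend", "momentum", "breakout", "volatility"] ≠ [] ∧ r = "trend") ∨
      (PySem.Set.inter N ["mean_reversion", "reversal", "fade", "contrarian", "vwap", "range"] ≠ [] ∧ r = "mean_revert") ∨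
      (PySem.Set.inter N ["chop", "avoid"] ≠ [] ∧ r = "avoid") := by
  simp only [pvRegimeTagMap, List.foldl_cons, List.foldl_nil]
  split_ifs with h1 h2 h3 <;>
    simp only [PySem.Set.mem_add, PySem.Set.empty, List.not_mem_nil, false_or] <;> tauto

lemma pv_nodupA (N : PySem.Set String) :
    (pvRegimeTagMap.foldl
        (fun allow p => if PySem.Set.inter N p.2 ≠ [] then PySem.Set.add allow p.1 else allow)
        PySem.Set.empty).Nodup := by
  simp only [pvRegimeTagMap, List.foldl_cons, List.foldl_nil]
  split_ifs <;> repeat' first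
    | exact List.nodup_nil
    | apply PySem.Set.nodup_add

-- a nonempty intersection with the normalized set = some tag lowers into the tagset
lemma pv_cond (tags : List String) (ts : PySem.Set String) :
    PySem.Set.inter (PySem.Set.ofList (tags.map PySem.Str.lower)) ts ≠ [] ↔
      ∃ t ∈ tags, PySem.Str.lower t ∈ ts := by
  constructor
  · intro h
    obtain ⟨x, hx⟩ := List.exists_mem_of_ne_nil _ h
    obtain ⟨hxN, hxts⟩ := (PySem.Set.mem_inter _ _ _).1 hx
    obtain ⟨t, ht, rfl⟩ := List.mem_map.1 ((PySem.Set.mem_ofList _ _).1 hxN)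
    exact ⟨t, ht, hxts⟩
  · rintro ⟨t, ht, hts⟩ hnil
    have hmem : PySem.Str.lower t ∈
        PySem.Set.inter (PySem.Set.ofList (tags.map PySem.Str.lower)) ts :=
      (PySem.Set.mem_inter _ _ _).2 ⟨(PySem.Set.mem_ofList _ _).2 (List.mem_map.2 ⟨t, ht, rfl⟩), hts⟩
    rw [hnil] at hmem
    exact List.not_mem_nil hmem

-- the two accumulators have the same members
lemma pv_mem_iff (tags : List String) (r : String) :
    r ∈ pvRegimeTagMap.foldl
        (fun allow p =>
          if PySem.Set.inter (PySem.Set.ofList (tags.map PySem.Str.lower)) p.2 ≠ [] then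
            PySem.Set.add allow p.1 else allow)
        PySem.Set.empty ↔
    r ∈ tags.foldl
        (fun allow tag =>
          match pvTagToRegime.get? (PySem.Str.lower tag) with
          | some regime => PySem.Set.add allow regime
          | none => allow) PySem.Set.empty := by
  rw [pv_memA, pv_memB]
  simp only [pv_cond, pv_get_some, PySem.Set.empty, List.not_mem_nil, false_or]
  constructor
  · rintro (⟨⟨t, ht, hts⟩, rfl⟩ | ⟨⟨t, ht, hts⟩, rfl⟩ | ⟨⟨t, ht, hts⟩, rfl⟩)
    · exact ⟨t, ht, Or.inl ⟨hts, rfl⟩⟩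
    · exact ⟨t, ht, Or.inr (Or.inl ⟨hts, rfl⟩)⟩
    · exact ⟨t, ht, Or.inr (Or.inr ⟨hts, rfl⟩)⟩
  · rintro ⟨t, ht, ⟨hts, rfl⟩ | ⟨hts, rfl⟩ | ⟨hts, rfl⟩⟩
    · exact Or.inl ⟨⟨t, ht, hts⟩, rfl⟩
    · exact Or.inr (Or.inl ⟨⟨t, ht, hts⟩, rfl⟩)
    · exact Or.inr (Or.inr ⟨⟨t, ht, hts⟩, rfl⟩)

-- the common tail: two nodup accumulators with the same members give the same final answer
lemma pv_tail (X Y : PySem.Set String) (hX : X.Nodup) (hY : Y.Nodup)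
    (hmem : ∀ r, r ∈ X ↔ r ∈ Y) :
    (if X = [] then (none : Option (List String))
     else some (PySem.List.sorted X (fun x => x) false)) =
    (if Y = [] then none else some (PySem.List.sorted Y (fun x => x) false)) := by
  have hperm : X.Perm Y := (List.perm_ext_iff_of_nodup hX hY).2 hmem
  by_cases hz : Y = []
  · have hzX : X = [] := (hz ▸ hperm).eq_nil
    rw [if_pos hzX, if_pos hz]
  · have hzX : X ≠ [] := fun e => hz (e ▸ hperm.symm).eq_nil
    rw [if_neg hzX, if_neg hz]
    congr 1
    apply PySem.List.sorted_eq_of_perm_of_pairwise_lt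
    · exact (PySem.List.sorted_perm Y (fun x => x) false).trans hperm.symm
    · have hle := PySem.List.sorted_pairwise Y (fun x => x)
      have hnd : (PySem.List.sorted Y (fun x => x) false).Nodup :=
        ((PySem.List.sorted_perm Y (fun x => x) false).nodup_iff).2 hY
      exact (hle.and hnd).imp fun h => lt_of_le_of_ne h.1 h.2

-- ===== VERDICT (by name: the statement is the Claim_ definition above) =====
theorem infer_regime_allowlist_py_spec : Claim_equal_infer_regime_allowlist_py := by
  unfold Claim_equal_infer_regime_allowlist_py Spec_infer_regime_allowlist_py
  intro tags _
  by_cases h0 : tags = []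
  · simp [infer_regime_allowlist_py, infer_regime_allowlist_py_alt, h0]
  · simp only [infer_regime_allowlist_py, infer_regime_allowlist_py_alt, if_neg h0]
    exact pv_tail _ _ (pv_nodupA _) (pv_nodupB _ _ List.nodup_nil) (pv_mem_iff tags)
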